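-- pv_equiv track=rewrite | github.com/JihoonNoahLee/baekjoon | 1966/1966.py | find_print_order
-- ===== SOURCE A (Python) =====
-- from collections import deque
--
-- def find_print_order(priorities: list[int], target_idx: int) -> int:
--     queue: deque = deque([(idx, priority) for idx, priority
--                           in enumerate(priorities)])
--     count: int = 0
--
--     while queue:
--         doc = queue.popleft()
--         if any(doc[1] < q_doc[1] for q_doc in queue):
--             queue.append(doc)
--         else:
--             count += 1
--             if doc[0] == target_idx:
--                 break
--     return count
-- ===== SOURCE B (Python) =====
-- def find_print_order(priorities: list[int], target_idx: int) -> int: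
--     # Instead of popping/requeuing one element at a time with an O(n) rescan per pop,
--     # jump directly to the first maximum, rotate the list there, and print it.
--     order = list(enumerate(priorities))
--     count = 0
--     while order:
--         m = max(p for _, p in order)
--         j = next(i for i, (_, p) in enumerate(order) if p == m)
--         idx = order[j][0]
--         order = order[j + 1:] + order[:j]
--         count += 1
--         if idx == target_idx:
--             break
--     return count
-- ===== Notes on version B (the rewrite author's own statement) =====
-- stated objective: faster
-- what changed: B drops the deque pop/any-rescan/requeue simulation entirely: it locates the first maximum-priority document directly, rotates the list past it and prints it, one print per iteration, removing the per-pop O(n) rescan and the one-element-at-a-time requeue churn.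
import Mathlib
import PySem

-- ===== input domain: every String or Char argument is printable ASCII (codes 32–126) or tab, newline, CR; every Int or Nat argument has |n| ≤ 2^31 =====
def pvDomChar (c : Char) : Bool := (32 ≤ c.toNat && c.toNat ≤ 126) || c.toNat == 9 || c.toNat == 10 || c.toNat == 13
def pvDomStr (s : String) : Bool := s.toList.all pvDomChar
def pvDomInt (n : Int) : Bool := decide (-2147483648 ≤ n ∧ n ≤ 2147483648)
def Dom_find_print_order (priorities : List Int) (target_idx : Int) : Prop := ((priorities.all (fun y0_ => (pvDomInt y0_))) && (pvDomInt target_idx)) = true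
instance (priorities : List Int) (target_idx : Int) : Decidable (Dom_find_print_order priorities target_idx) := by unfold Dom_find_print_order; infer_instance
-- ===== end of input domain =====

-- B replaces A's pop / rescan / requeue simulation by jumping straight to the first
-- maximum-priority document and rotating the list there (objective: alternative algorithm).

-- ===== PORT A =====

-- maximum priority in the queue (used only by the termination measure of the A-side loop)
def pvMaxP (q : List (Int × Int)) : Int :=
  (PySem.List.max? (q.map Prod.snd) (fun y => y)).getD 0

-- index of the first document of maximal priority (termination measure of the A-side loop)
def pvMIdx (q : List (Int × Int)) : Nat :=
  q.findIdx (fun e => decide (pvMaxP q ≤ e.2))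

-- termination fact for pvLoopA, cited by name in its decreasing_by
theorem pvMIdx_requeue (d : (Int × Int)) (rest : List (Int × Int))
    (h : rest.any (fun e => decide (d.2 < e.2)) = true) :
    pvMIdx (rest ++ [d]) < pvMIdx (d :: rest) := by
  obtain ⟨e, he, hde⟩ := List.any_eq_true.mp h
  simp only [decide_eq_true_eq] at hde
  -- the maximum of d :: rest
  obtain ⟨m, hm⟩ : ∃ m, PySem.List.max? ((d :: rest).map Prod.snd) (fun y => y) = some m := by
    cases hmm : PySem.List.max? ((d :: rest).map Prod.snd) (fun y => y) with
    | none => simp [PySem.List.max?_eq_none_iff] at hmm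
    | some m => exact ⟨m, rfl⟩
  have hmem : m ∈ (d :: rest).map Prod.snd := PySem.List.max?_mem hm
  have hmax : ∀ y ∈ (d :: rest).map Prod.snd, y ≤ m := fun y hy => PySem.List.max?_isMax hm y hy
  have hdm : d.2 < m := lt_of_lt_of_le hde (hmax e.2 (List.mem_map_of_mem (List.mem_cons_of_mem d he)))
  -- same maximum for the rotated queue (same elements)
  obtain ⟨m', hm'⟩ : ∃ m', PySem.List.max? ((rest ++ [d]).map Prod.snd) (fun y => y) = some m' := by
    cases hmm : PySem.List.max? ((rest ++ [d]).map Prod.snd) (fun y => y) with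
    | none => simp [PySem.List.max?_eq_none_iff] at hmm
    | some m' => exact ⟨m', rfl⟩
  have hperm : ((rest ++ [d]).map Prod.snd).Perm ((d :: rest).map Prod.snd) :=
    List.Perm.map _ (List.perm_append_singleton d rest)
  have hmem' : m' ∈ (rest ++ [d]).map Prod.snd := PySem.List.max?_mem hm'
  have hmax' : ∀ y ∈ (rest ++ [d]).map Prod.snd, y ≤ m' := fun y hy => PySem.List.max?_isMax hm' y hy
  have hmm' : m' = m := le_antisymm (hmax _ (hperm.mem_iff.mp hmem')) (hmax' _ (hperm.mem_iff.mpr hmem))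
  -- m is attained in rest (not at d, since d.2 < m)
  have hrest : ∃ x ∈ rest, (decide (m ≤ x.2)) = true := by
    rcases List.mem_map.mp hmem with ⟨x, hx, hx2⟩
    cases hx with
    | head => omega
    | tail _ hx => exact ⟨x, hx, by simp [hx2]⟩
  have hlt : rest.findIdx (fun e => decide (m ≤ e.2)) < rest.length :=
    List.findIdx_lt_length_of_exists hrest
  have hd : decide (m ≤ d.2) = false := by simp; omega
  have h1 : pvMIdx (d :: rest) = List.findIdx (fun e => decide (m ≤ e.2)) rest + 1 := by
    simp only [pvMIdx, pvMaxP, hm, Option.getD_some, List.findIdx_cons, hd, cond_false]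
  have h2 : pvMIdx (rest ++ [d]) = List.findIdx (fun e => decide (m ≤ e.2)) rest := by
    simp only [pvMIdx, pvMaxP, hm', hmm', Option.getD_some, List.findIdx_append, if_pos hlt]
  omega

-- the while loop of A: pop the front document, requeue it if any queued document has
-- a higher priority, otherwise print it (count += 1) and stop when it is the target
def pvLoopA (t : Int) (q : List (Int × Int)) (c : Int) : Int :=
  match q with
  | [] => c
  | d :: rest =>
    if rest.any (fun e => decide (d.2 < e.2)) then      -- any(doc[1] < q_doc[1] for q_doc in queue)
      pvLoopA t (rest ++ [d]) c                          -- queue.append(doc)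
    else if d.1 = t then c + 1                           -- count += 1; break
    else pvLoopA t rest (c + 1)                          -- count += 1
termination_by (q.length, pvMIdx q)
decreasing_by
  · simp only [List.length_append, List.length_cons, List.length_nil]
    exact Prod.Lex.right _ (pvMIdx_requeue d rest (by assumption))
  · exact Prod.Lex.left _ _ (by simp)

def find_print_order (priorities : List Int) (target_idx : Int) : Int :=
  pvLoopA target_idx (PySem.List.enumerate priorities 0) 0

-- ===== PORT B =====

-- termination facts for pvLoopB, cited by name in its decreasing_by
theorem pv_findIdx_max_lt (d : Int × Int) (rest : List (Int × Int)) :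
    (d :: rest).findIdx (fun e => decide (e.2 = (PySem.List.max? ((d :: rest).map Prod.snd) (fun y => y)).getD 0)) < (d :: rest).length := by
  obtain ⟨m, hm⟩ : ∃ m, PySem.List.max? ((d :: rest).map Prod.snd) (fun y => y) = some m := by
    cases hmm : PySem.List.max? ((d :: rest).map Prod.snd) (fun y => y) with
    | none => simp [PySem.List.max?_eq_none_iff] at hmm
    | some m => exact ⟨m, rfl⟩
  apply List.findIdx_lt_length_of_exists
  rcases List.mem_map.mp (PySem.List.max?_mem hm) with ⟨x, hx, hx2⟩
  exact ⟨x, hx, by simp only [hm, Option.getD_some, hx2, decide_eq_true_eq]⟩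

theorem pv_slice_rot_length_lt {α : Type} (q : List α) (j : Nat) (hj : j < q.length) :
    (PySem.List.slice q (some ((j : Int) + 1)) none ++ PySem.List.slice q none (some (j : Int))).length < q.length := by
  have h1 : PySem.List.slice q (some ((j : Int) + 1)) none = q.drop (j + 1) := by
    rw [show ((j : Int) + 1) = ((j + 1 : Nat) : Int) by push_cast; ring]
    exact PySem.List.slice_from_natCast q (j + 1)
  have h2 : PySem.List.slice q none (some (j : Int)) = q.take j :=
    PySem.List.slice_to_natCast q j
  rw [h1, h2]
  simp [List.length_drop, List.length_take]
  omega

-- the while loop of B: find the first document of maximal priority, print it,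
-- and continue with the queue rotated past it
def pvLoopB (t : Int) (q : List (Int × Int)) (c : Int) : Int :=
  match q with
  | [] => c
  | d :: rest =>
    let m := (PySem.List.max? ((d :: rest).map Prod.snd) (fun y => y)).getD 0  -- max(p for _, p in order); getD total-guard, list nonempty
    let j := (d :: rest).findIdx (fun e => decide (e.2 = m))                   -- next(i for i, (_, p) in enumerate(order) if p == m)
    let idx := ((d :: rest)[j]?.getD d).1                                      -- order[j][0]; getD total-guard, j is in range
    let q' := PySem.List.slice (d :: rest) (some ((j : Int) + 1)) none
              ++ PySem.List.slice (d :: rest) none (some (j : Int))            -- order[j+1:] + order[:j]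
    if idx = t then c + 1 else pvLoopB t q' (c + 1)
termination_by q.length
decreasing_by
  exact pv_slice_rot_length_lt (d :: rest) _ (pv_findIdx_max_lt d rest)

def find_print_order_alt (priorities : List Int) (target_idx : Int) : Int :=
  pvLoopB target_idx (PySem.List.enumerate priorities 0) 0

-- ===== PRECONDITION & SPEC =====
def Spec_find_print_order (priorities : List Int) (target_idx : Int) (out : Int) : Prop := out = find_print_order_alt priorities target_idx
instance (priorities : List Int) (target_idx : Int) (out : Int) : Decidable (Spec_find_print_order priorities target_idx out) := by unfold Spec_find_print_order; infer_instance

-- ===== CLAIM (what is proved, stated in full; the proofs are below) =====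
def Claim_equal_find_print_order : Prop := ∀ (priorities : List Int) (target_idx : Int), Dom_find_print_order priorities target_idx → Spec_find_print_order priorities target_idx (find_print_order priorities target_idx)

-- ===== LEMMAS AND PROOFS =====

-- the maximum value of a list is invariant under permutation
theorem pv_max?_getD_perm (l₁ l₂ : List Int) (hp : l₁.Perm l₂) :
    (PySem.List.max? l₁ (fun y => y)).getD 0 = (PySem.List.max? l₂ (fun y => y)).getD 0 := by
  cases hl : l₁ with
  | nil => subst hl; rw [List.nil_perm] at hp; subst hp; rfl
  | cons a l =>
    subst hl
    obtain ⟨m, hm⟩ : ∃ m, PySem.List.max? (a :: l) (fun y => y) = some m := by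
      cases hmm : PySem.List.max? (a :: l) (fun y => y) with
      | none => simp [PySem.List.max?_eq_none_iff] at hmm
      | some m => exact ⟨m, rfl⟩
    obtain ⟨m', hm'⟩ : ∃ m', PySem.List.max? l₂ (fun y => y) = some m' := by
      cases hmm : PySem.List.max? l₂ (fun y => y) with
      | none => rw [PySem.List.max?_eq_none_iff] at hmm; subst hmm; simp [List.perm_nil] at hp
      | some m' => exact ⟨m', rfl⟩
    rw [hm, hm']
    have h1 : m ∈ a :: l := PySem.List.max?_mem hm
    have h2 : m' ∈ l₂ := PySem.List.max?_mem hm'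
    have h3 : ∀ y ∈ a :: l, y ≤ m := fun y hy => PySem.List.max?_isMax hm y hy
    have h4 : ∀ y ∈ l₂, y ≤ m' := fun y hy => PySem.List.max?_isMax hm' y hy
    simp only [Option.getD_some]
    exact le_antisymm (h4 _ (hp.mem_iff.mp h1)) (h3 _ (hp.mem_iff.mpr h2))

-- rotating a non-maximal front document to the back does not change B's result:
-- B jumps to the first maximum either way
theorem pvLoopB_rot (t : Int) (d : Int × Int) (rest : List (Int × Int)) (c : Int)
    (h : ∃ e ∈ rest, d.2 < e.2) :
    pvLoopB t (rest ++ [d]) c = pvLoopB t (d :: rest) c := by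
  obtain ⟨e, he, hde⟩ := h
  cases rest with
  | nil => cases he
  | cons r rs =>
  obtain ⟨m, hm⟩ : ∃ m, PySem.List.max? ((d :: r :: rs).map Prod.snd) (fun y => y) = some m := by
    cases hmm : PySem.List.max? ((d :: r :: rs).map Prod.snd) (fun y => y) with
    | none => simp [PySem.List.max?_eq_none_iff] at hmm
    | some m => exact ⟨m, rfl⟩
  have hrotmax : (PySem.List.max? (((r :: rs) ++ [d]).map Prod.snd) (fun y => y)).getD 0
      = (PySem.List.max? ((d :: r :: rs).map Prod.snd) (fun y => y)).getD 0 :=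
    pv_max?_getD_perm _ _ (List.Perm.map _ (List.perm_append_singleton d (r :: rs)))
  have hmax : ∀ y ∈ (d :: r :: rs).map Prod.snd, y ≤ m := fun y hy => PySem.List.max?_isMax hm y hy
  have hdm : d.2 < m := lt_of_lt_of_le hde (hmax e.2 (List.mem_map_of_mem (List.mem_cons_of_mem d he)))
  -- the first index of priority m in r :: rs
  set j' := (r :: rs).findIdx (fun e => decide (e.2 = m)) with hj'def
  have hj' : j' < (r :: rs).length := by
    apply List.findIdx_lt_length_of_exists
    rcases List.mem_map.mp (PySem.List.max?_mem hm) with ⟨x, hx, hx2⟩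
    cases hx with
    | head => exact absurd hx2 (by omega)
    | tail _ hx => exact ⟨x, hx, by simp [hx2]⟩
  have hdfalse : decide (d.2 = m) = false := by simp; omega
  -- the first maximum in the two queues
  have hjL : ((r :: rs) ++ [d]).findIdx (fun e => decide (e.2 = m)) = j' := by
    rw [List.findIdx_append, if_pos hj']
  have hjR : (d :: r :: rs).findIdx (fun e => decide (e.2 = m)) = j' + 1 := by
    rw [List.findIdx_cons, hdfalse]; rfl
  -- the printed document and the rotated remainders agree
  have hgl : ((r :: rs) ++ [d])[j']? = (r :: rs)[j']? := List.getElem?_append_left hj'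
  have hx : (r :: rs)[j']? = some (r :: rs)[j'] := List.getElem?_eq_getElem hj'
  have hs1 : PySem.List.slice ((r :: rs) ++ [d]) (some ((j' : Int) + 1)) none
      = (r :: rs).drop (j' + 1) ++ [d] := by
    rw [show ((j' : Int) + 1) = ((j' + 1 : Nat) : Int) by push_cast; ring]
    rw [PySem.List.slice_from_natCast]
    exact List.drop_append_of_le_length hj'
  have hs2 : PySem.List.slice ((r :: rs) ++ [d]) none (some (j' : Int))
      = (r :: rs).take j' := by
    rw [PySem.List.slice_to_natCast]
    exact List.take_append_of_le_length (le_of_lt hj')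
  have hs3 : PySem.List.slice (d :: r :: rs) (some (((j' + 1 : Nat) : Int) + 1)) none
      = (r :: rs).drop (j' + 1) := by
    rw [show (((j' + 1 : Nat) : Int) + 1) = ((j' + 2 : Nat) : Int) by push_cast; ring]
    rw [PySem.List.slice_from_natCast]
    rfl
  have hs4 : PySem.List.slice (d :: r :: rs) none (some ((j' + 1 : Nat) : Int))
      = d :: (r :: rs).take j' := by
    rw [PySem.List.slice_to_natCast]
    rfl
  conv_lhs => rw [List.cons_append, pvLoopB]
  conv_rhs => rw [pvLoopB]
  rw [List.cons_append] at hrotmax hjL hgl hs1 hs2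
  simp only [hrotmax, hm, Option.getD_some, hjL, hjR, hgl, hx, hs1, hs2, hs3, hs4,
    List.getElem?_cons_succ, List.append_assoc, List.cons_append, List.nil_append]

-- when no queued document beats the front one, B also prints the front document
theorem pvLoopB_print (t : Int) (d : Int × Int) (rest : List (Int × Int)) (c : Int)
    (h : rest.any (fun e => decide (d.2 < e.2)) = false) :
    pvLoopB t (d :: rest) c = if d.1 = t then c + 1 else pvLoopB t rest (c + 1) := by
  obtain ⟨m, hm⟩ : ∃ m, PySem.List.max? ((d :: rest).map Prod.snd) (fun y => y) = some m := by
    cases hmm : PySem.List.max? ((d :: rest).map Prod.snd) (fun y => y) with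
    | none => simp [PySem.List.max?_eq_none_iff] at hmm
    | some m => exact ⟨m, rfl⟩
  have hle : ∀ x ∈ rest, ¬ d.2 < x.2 := by
    intro x hx
    have := List.any_eq_false.mp h x hx
    simpa using this
  have hdm : m = d.2 := by
    have h1 : d.2 ≤ m := PySem.List.max?_isMax hm d.2 (by simp)
    rcases List.mem_map.mp (PySem.List.max?_mem hm) with ⟨x, hx, hx2⟩
    cases hx with
    | head => omega
    | tail _ hx => have := hle x hx; omega
  have hdt : decide (d.2 = m) = true := by simp [hdm]
  have hj : (d :: rest).findIdx (fun e => decide (e.2 = m)) = 0 := by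
    rw [List.findIdx_cons, hdt]; rfl
  have hs1 : PySem.List.slice (d :: rest) (some ((0 : Int) + 1)) none = rest := by
    rw [show ((0 : Int) + 1) = ((1 : Nat) : Int) by simp]
    rw [PySem.List.slice_from_natCast]
    rfl
  have hs2 : PySem.List.slice (d :: rest) none (some (0 : Int)) = [] := by
    rw [show (0 : Int) = ((0 : Nat) : Int) by simp]
    rw [PySem.List.slice_to_natCast]
    rfl
  conv_lhs => rw [pvLoopB]
  simp only [hm, Option.getD_some, hj, hs1, hs2, List.getElem?_cons_zero,
    List.append_nil, Nat.cast_zero]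

-- the two loops agree on every queue state
theorem pvLoop_eq (t : Int) (q : List (Int × Int)) (c : Int) :
    pvLoopA t q c = pvLoopB t q c := by
  fun_induction pvLoopA t q c with
  | case1 c => rw [pvLoopB]
  | case2 c d rest hany ih =>
    rw [ih]
    exact pvLoopB_rot t d rest c (by simpa using List.any_eq_true.mp hany)
  | case3 c d rest hany hd =>
    rw [pvLoopB_print t d rest c (by simpa using hany), if_pos hd]
  | case4 c d rest hany hd ih =>
    rw [pvLoopB_print t d rest c (by simpa using hany), if_neg hd, ih]

-- ===== VERDICT (by name: the statement is the Claim_ definition above) =====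
theorem find_print_order_spec : Claim_equal_find_print_order := by
  intro priorities target_idx _
  unfold Spec_find_print_order find_print_order find_print_order_alt
  exact pvLoop_eq _ _ _
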